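-- pv_equiv track=rewrite | github.com/MilenPlamenov/Python-practice | HackerRank Tech Uni/odd numbers.py | solve
-- ===== SOURCE A (Python) =====
-- from itertools import combinations
--
-- def solve(numbers_list, max_s):
--     counter = 0
--     all_combinations = list(combinations(numbers_list, 2))
--     for combination in all_combinations:
--         combination_sum = sum(combination)
--         if combination_sum % 2 != 0 and combination_sum <= max_s:
--             counter += 1
--
--     return counter
-- ===== SOURCE B (Python) =====
-- def solve(numbers_list, max_s):
--     # split once into parity classes; an odd pair-sum needs exactly one even and one odd,
--     # so count cross pairs only (skips all same-parity pairs and builds no tuple list)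
--     odds = [x for x in numbers_list if x % 2 != 0]
--     evens = [x for x in numbers_list if x % 2 == 0]
--     return sum(1 for e in evens for o in odds if e + o <= max_s)
-- ===== Notes on version B (the rewrite author's own statement) =====
-- stated objective: faster
-- what changed: B splits the list into evens and odds once and counts only even+odd cross pairs, instead of materialising all C(n,2) combinations and testing each pair's sum for oddness.
import Mathlib
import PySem

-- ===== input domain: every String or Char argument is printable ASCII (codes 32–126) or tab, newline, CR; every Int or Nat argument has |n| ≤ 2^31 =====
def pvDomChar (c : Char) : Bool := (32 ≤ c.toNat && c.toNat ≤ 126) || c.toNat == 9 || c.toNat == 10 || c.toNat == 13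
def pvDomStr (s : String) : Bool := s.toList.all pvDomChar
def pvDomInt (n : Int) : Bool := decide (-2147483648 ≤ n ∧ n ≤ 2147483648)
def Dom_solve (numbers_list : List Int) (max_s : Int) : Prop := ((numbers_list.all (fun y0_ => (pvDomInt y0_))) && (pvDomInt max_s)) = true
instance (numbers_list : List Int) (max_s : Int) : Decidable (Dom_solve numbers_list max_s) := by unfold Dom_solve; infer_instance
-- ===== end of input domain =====

-- B splits the list into evens and odds once and counts even+odd cross pairs, instead of
-- scanning all C(n,2) combinations; measurably faster by a constant factor (same O(n^2) class).

-- ===== PORT A =====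
def solve (numbers_list : List Int) (max_s : Int) : Int :=
  let all_combinations := PySem.List.combinations numbers_list 2
  all_combinations.foldl (fun counter combination =>
    let combination_sum := combination.sum
    if PySem.Int.mod combination_sum 2 ≠ 0 ∧ combination_sum ≤ max_s then counter + 1
    else counter) 0

-- ===== PORT B =====
def solve_alt (numbers_list : List Int) (max_s : Int) : Int :=
  let odds := numbers_list.filter (fun x => decide (PySem.Int.mod x 2 ≠ 0))
  let evens := numbers_list.filter (fun x => decide (PySem.Int.mod x 2 = 0))
  ((evens.map (fun e => (odds.countP (fun o => decide (e + o ≤ max_s))))).sum : Nat)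

-- ===== PRECONDITION & SPEC =====
def Spec_solve (numbers_list : List Int) (max_s : Int) (out : Int) : Prop := out = solve_alt numbers_list max_s
instance (numbers_list : List Int) (max_s : Int) (out : Int) : Decidable (Spec_solve numbers_list max_s out) := by unfold Spec_solve; infer_instance

-- ===== CLAIM (what is proved, stated in full; the proofs are below) =====
def Claim_equal_solve : Prop := ∀ (numbers_list : List Int) (max_s : Int), Dom_solve numbers_list max_s → Spec_solve numbers_list max_s (solve numbers_list max_s)

-- ===== LEMMAS AND PROOFS =====

-- the key counting identity: pairs with odd sum ≤ m among C(l,2) are exactly the even×odd cross pairs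
lemma count_comb2_eq (m : Int) (l : List Int) :
    (PySem.List.combinations l 2).countP
      (fun c => decide (PySem.Int.mod c.sum 2 ≠ 0 ∧ c.sum ≤ m)) =
    ((l.filter (fun x => decide (PySem.Int.mod x 2 = 0))).map
      (fun e => (l.filter (fun x => decide (PySem.Int.mod x 2 ≠ 0))).countP
        (fun o => decide (e + o ≤ m)))).sum := by
  induction l with
  | nil => simp [PySem.List.combinations]
  | cons x xs ih =>
    rw [PySem.List.combinations_cons_succ, PySem.List.combinations_one,
        List.countP_append, List.map_map, List.countP_map, ih]
    simp only [Function.comp_def, List.sum_cons, List.sum_nil, add_zero, List.filter_cons]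
    by_cases hx : (2 : Int) ∣ x
    · have hxe : decide (PySem.Int.mod x 2 = 0) = true := by
        simp [hx]
      have hxo : decide (PySem.Int.mod x 2 ≠ 0) = false := by
        simp [hx]
      simp only [hxe, hxo, if_true, if_false, Bool.false_eq_true, List.map_cons, List.sum_cons]
      have hA : xs.countP (fun y => decide (PySem.Int.mod (x + y) 2 ≠ 0 ∧ x + y ≤ m))
          = (xs.filter (fun y => decide (PySem.Int.mod y 2 ≠ 0))).countP
              (fun o => decide (x + o ≤ m)) := by
        rw [List.countP_filter]
        apply List.countP_congr
        intro y _
        simp only [Bool.and_eq_true, decide_eq_true_eq]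
        rw [ne_eq, ne_eq, PySem.Int.mod_eq_zero_iff_dvd, PySem.Int.mod_eq_zero_iff_dvd]
        omega
      omega
    · have hxe : decide (PySem.Int.mod x 2 = 0) = false := by
        simp [hx]
      have hxo : decide (PySem.Int.mod x 2 ≠ 0) = true := by
        simp [hx]
      simp only [hxe, hxo, if_true, if_false, Bool.false_eq_true]
      -- left new term counts the evens y with x + y ≤ m
      have hA : xs.countP (fun y => decide (PySem.Int.mod (x + y) 2 ≠ 0 ∧ x + y ≤ m))
          = (xs.filter (fun y => decide (PySem.Int.mod y 2 = 0))).countP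
              (fun e => decide (e + x ≤ m)) := by
        rw [List.countP_filter]
        apply List.countP_congr
        intro y _
        simp only [Bool.and_eq_true, decide_eq_true_eq]
        rw [ne_eq, PySem.Int.mod_eq_zero_iff_dvd, PySem.Int.mod_eq_zero_iff_dvd]
        omega
      -- on the right each even e additionally counts the new odd x
      have hB :
          ((xs.filter (fun y => decide (PySem.Int.mod y 2 = 0))).map
            (fun e => (x :: xs.filter (fun y => decide (PySem.Int.mod y 2 ≠ 0))).countP
              (fun o => decide (e + o ≤ m)))).sum
        = (xs.filter (fun y => decide (PySem.Int.mod y 2 = 0))).countP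
            (fun e => decide (e + x ≤ m))
          + ((xs.filter (fun y => decide (PySem.Int.mod y 2 = 0))).map
              (fun e => (xs.filter (fun y => decide (PySem.Int.mod y 2 ≠ 0))).countP
                (fun o => decide (e + o ≤ m)))).sum := by
        simp only [List.countP_cons]
        rw [List.sum_map_add, PySem.List.sum_map_ite_one_zero_nat]
        omega
      rw [hB, hA]

-- ===== VERDICT (by name: the statement is the Claim_ definition above) =====
theorem solve_spec : Claim_equal_solve := by
  intro numbers_list max_s _
  show _ = _
  unfold solve solve_alt
  rw [PySem.List.foldl_ite_add_one]
  rw [count_comb2_eq max_s numbers_list]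
  simp
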